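-- pv_equiv track=rewrite | github.com/tushancse04/nlp | nlp_03/problem_1.py | get_max_freq
-- ===== SOURCE A (Python) =====
-- def get_max_freq(inv_idx_dic):
-- 	term_max_freq_dic = {}
-- 	for ti in inv_idx_dic:
-- 		for dj in inv_idx_dic[ti][1]:
-- 			if dj not in term_max_freq_dic:
-- 				term_max_freq_dic[dj] = 0
-- 			if term_max_freq_dic[dj] < inv_idx_dic[ti][1][dj]:
-- 				term_max_freq_dic[dj] = inv_idx_dic[ti][1][dj]
-- 	return term_max_freq_dic
-- ===== SOURCE B (Python) =====
-- def get_max_freq(inv_idx_dic):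
-- 	grouped = {}
-- 	for postings in inv_idx_dic.values():
-- 		for d, f in postings[1].items():
-- 			grouped.setdefault(d, []).append(f)
-- 	return {d: max(fs + [0]) for d, fs in grouped.items()}
-- ===== Notes on version B (the rewrite author's own statement) =====
-- stated objective: alternative
-- what changed: A keeps one running max per document updated in place while scanning postings; B first gathers every frequency into per-document lists in one pass and then reduces each list with a seeded max in a second pass.
import Mathlib
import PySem

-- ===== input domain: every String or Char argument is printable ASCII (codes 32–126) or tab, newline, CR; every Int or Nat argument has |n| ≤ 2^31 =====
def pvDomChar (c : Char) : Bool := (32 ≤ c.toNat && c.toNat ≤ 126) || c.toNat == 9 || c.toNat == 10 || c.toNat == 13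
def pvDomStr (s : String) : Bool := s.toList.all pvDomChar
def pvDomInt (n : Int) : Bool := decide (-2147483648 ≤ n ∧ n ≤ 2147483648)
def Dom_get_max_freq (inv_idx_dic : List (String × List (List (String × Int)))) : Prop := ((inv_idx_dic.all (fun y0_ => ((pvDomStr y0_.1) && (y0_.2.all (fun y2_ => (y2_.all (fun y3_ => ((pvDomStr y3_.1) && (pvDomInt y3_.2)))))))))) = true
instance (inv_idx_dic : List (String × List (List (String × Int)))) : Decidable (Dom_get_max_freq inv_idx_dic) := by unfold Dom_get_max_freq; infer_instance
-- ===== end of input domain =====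

-- B replaces A's in-place running max per document by a gather pass (per-document frequency
-- lists) followed by a seeded-max reduce pass: an alternative decomposition, same cost.

-- ===== PORT A =====
-- A's `term_max_freq_dic[dj] = v` updates / `dj not in` test are PySem.Dict ops;
-- `inv_idx_dic[ti][1]` is PySem.List.pyGet? (none = IndexError, excluded by Pre_).
def get_max_freq (inv_idx_dic : List (String × List (List (String × Int)))) : List (String × Int) :=
  let final : PySem.Dict String Int :=
    (PySem.Dict.mk inv_idx_dic).keys.foldl (fun acc ti =>
      match (PySem.Dict.mk inv_idx_dic).get? ti with
      | none => acc            -- unreachable: ti is drawn from the dict's keys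
      | some ls =>
        match PySem.List.pyGet? ls 1 with
        | none => acc          -- Python raises IndexError here: excluded by Pre_
        | some inner =>
          (PySem.Dict.mk inner).keys.foldl (fun acc dj =>
            let acc := if acc.contains dj then acc else acc.insert dj 0
            if acc.getD dj 0 < (PySem.Dict.mk inner).getD dj 0 then
              acc.insert dj ((PySem.Dict.mk inner).getD dj 0)
            else acc) acc) PySem.Dict.empty
  final.items

-- ===== PORT B =====
-- max(fs + [0]) of Source B; the `none` branch is unreachable (fs ++ [0] ≠ []).
def pyMaxSeedZero (fs : List Int) : Int :=
  match PySem.List.max? (fs ++ [0]) (fun x => x) with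
  | some m => m
  | none => 0
def get_max_freq_alt (inv_idx_dic : List (String × List (List (String × Int)))) : List (String × Int) :=
  let grouped : PySem.Dict String (List Int) :=
    (PySem.Dict.mk inv_idx_dic).values.foldl (fun g postings =>
      match PySem.List.pyGet? postings 1 with
      | none => g              -- Python raises IndexError here: excluded by Pre_
      | some inner =>
        (PySem.Dict.mk inner).items.foldl
          (fun g p => g.insert p.1 (g.getD p.1 [] ++ [p.2])) g) PySem.Dict.empty
  grouped.items.map (fun p => (p.1, pyMaxSeedZero p.2))

-- ===== PRECONDITION & SPEC =====
-- Pre_ excludes (a) postings lists of length < 2, on which the Python A raises IndexError at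
-- `inv_idx_dic[ti][1]`, and (b) association lists with duplicate keys (outer or in the slot-1
-- dict), which never arise from A's Python dict arguments.
def Pre_get_max_freq (inv_idx_dic : List (String × List (List (String × Int)))) : Prop :=
  (inv_idx_dic.map Prod.fst).Nodup ∧
    ∀ p ∈ inv_idx_dic, 2 ≤ p.2.length ∧ ((p.2.getD 1 []).map Prod.fst).Nodup
instance (inv_idx_dic : List (String × List (List (String × Int)))) : Decidable (Pre_get_max_freq inv_idx_dic) := by unfold Pre_get_max_freq; infer_instance
def pvWitness_get_max_freq : (List (String × List (List (String × Int)))) :=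
  [("apple", [[("d1", 1)], [("d1", 3), ("d2", 1)]]), ("pear", [[], [("d2", 5)]])]
def Spec_get_max_freq (inv_idx_dic : List (String × List (List (String × Int)))) (out : List (String × Int)) : Prop := out = get_max_freq_alt inv_idx_dic
instance (inv_idx_dic : List (String × List (List (String × Int)))) (out : List (String × Int)) : Decidable (Spec_get_max_freq inv_idx_dic out) := by unfold Spec_get_max_freq; infer_instance

-- ===== CLAIM (what is proved, stated in full; the proofs are below) =====
def Claim_equal_get_max_freq : Prop := ∀ (inv_idx_dic : List (String × List (List (String × Int)))), Dom_get_max_freq inv_idx_dic → Pre_get_max_freq inv_idx_dic → Spec_get_max_freq inv_idx_dic (get_max_freq inv_idx_dic)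

-- ===== LEMMAS AND PROOFS =====

-- the value B's reduce pass assigns to a per-document list, as a running max seeded with 0
def redMax (p : String × List Int) : String × Int := (p.1, p.2.foldl max 0)

-- A's per-posting update and B's per-posting gather, factored out of the inner loops
def stepA (acc : PySem.Dict String Int) (d : String) (f : Int) : PySem.Dict String Int :=
  let acc := if acc.contains d then acc else acc.insert d 0
  if acc.getD d 0 < f then acc.insert d f else acc
def stepG (g : PySem.Dict String (List Int)) (d : String) (f : Int) : PySem.Dict String (List Int) :=
  g.insert d (g.getD d [] ++ [f])

lemma foldl_max_shift (t : List Int) (a b : Int) :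
    t.foldl max (max a b) = max a (t.foldl max b) := by
  induction t generalizing b with
  | nil => simp
  | cons c t ih => simpa [max_assoc] using ih (max b c)

lemma pyMaxSeedZero_eq (fs : List Int) : pyMaxSeedZero fs = fs.foldl max 0 := by
  cases fs with
  | nil => simp [pyMaxSeedZero, PySem.List.max?_id_cons]
  | cons x t =>
    simp only [pyMaxSeedZero, List.cons_append, PySem.List.max?_id_cons, List.foldl_append]
    show max (List.foldl max x t) 0 = List.foldl max (max 0 x) t
    rw [foldl_max_shift t 0 x, max_comm]

lemma find?_nodup {β : Type} (l : List (String × β)) (k : String) (v : β)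
    (h : (l.map Prod.fst).Nodup) (hm : (k, v) ∈ l) :
    l.find? (fun p => p.1 == k) = some (k, v) := by
  induction l with
  | nil => simp at hm
  | cons a t ih =>
    simp only [List.map_cons, List.nodup_cons] at h
    rcases List.mem_cons.1 hm with rfl | hm'
    · simp
    · have hne : ¬ (a.1 == k) = true := by
        intro hb
        exact h.1 (by simpa [beq_iff_eq.1 hb] using List.mem_map_of_mem (f := Prod.fst) hm')
      simp [List.find?, hne, ih h.2 hm']

-- duplicate-free assoc list: any member with key k is the found entry
lemma mem_eq_of_nodup {β : Type} (l : List (String × β)) (k : String) (v : β)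
    (h : (l.map Prod.fst).Nodup) (hm : (k, v) ∈ l) :
    ∀ p ∈ l, p.1 = k → p = (k, v) := by
  induction l with
  | nil => simp
  | cons a t ih =>
    simp only [List.map_cons, List.nodup_cons] at h
    intro p hp hk
    rcases List.mem_cons.1 hp with rfl | hp' <;> rcases List.mem_cons.1 hm with h1 | hm'
    · exact h1.symm
    · exact absurd (by simpa [hk] using List.mem_map_of_mem (f := Prod.fst) hm') h.1
    · exact absurd (by simpa [← h1, ← hk] using List.mem_map_of_mem (f := Prod.fst) hp') h.1
    · exact ih h.2 hm' p hp' hk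

-- the invariant tying A's accumulator to B's grouped lists
def DRel (acc : PySem.Dict String Int) (g : PySem.Dict String (List Int)) : Prop :=
  acc.items = g.items.map redMax ∧ (g.items.map Prod.fst).Nodup

-- `redMax` keeps the key, so find?/any on B's mapped items mirror those on A's items
lemma find?_map_redMax (l : List (String × List Int)) (d : String) :
    (l.map redMax).find? (fun p => p.1 == d) = (l.find? (fun p => p.1 == d)).map redMax := by
  rw [List.find?_map]; rfl

lemma any_map_redMax (l : List (String × List Int)) (d : String) :
    (l.map redMax).any (fun p => p.1 == d) = l.any (fun p => p.1 == d) := by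
  rw [List.any_map]; rfl

lemma DRel_step (acc : PySem.Dict String Int) (g : PySem.Dict String (List Int))
    (d : String) (f : Int) (h : DRel acc g) : DRel (stepA acc d f) (stepG g d f) := by
  obtain ⟨hi, hn⟩ := h
  cases hfd : g.items.find? (fun p => p.1 == d) with
  | none =>
    have hnk : ∀ p ∈ g.items, ¬ (p.1 == d) = true := List.find?_eq_none.1 hfd
    have hanyg : g.items.any (fun p => p.1 == d) = false := by
      simp only [List.any_eq_false]; exact hnk
    have hanya : acc.items.any (fun p => p.1 == d) = false := by
      rw [hi, any_map_redMax, hanyg]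
    have hfind1 : (acc.items ++ [(d, (0:Int))]).find? (fun p => p.1 == d) = some (d, 0) := by
      rw [List.find?_append]
      have : acc.items.find? (fun p => p.1 == d) = none := by
        rw [hi, find?_map_redMax, hfd]; rfl
      simp [this]
    have hmapid : ∀ (v : Int),
        acc.items.map (fun p => if p.1 == d then (d, v) else p) = acc.items := by
      intro v
      conv_rhs => rw [← List.map_id acc.items]
      apply List.map_congr_left
      intro p hp
      have hpn : ¬ (p.1 == d) = true := by
        rw [hi] at hp
        obtain ⟨q, hq, rfl⟩ := List.mem_map.1 hp
        exact hnk q hq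
      simp [hpn]
    have hc0 : acc.contains d = false := hanya
    have hins0 : (acc.insert d 0).items = acc.items ++ [(d, (0:Int))] :=
      PySem.Dict.items_insert_of_not_contains _ _ hc0
    have hgetD : (acc.insert d 0).getD d 0 = 0 := by
      simp [PySem.Dict.getD, PySem.Dict.get?, hins0, hfind1]
    have hc1 : (acc.insert d 0).contains d = true := by
      simp [PySem.Dict.contains, hins0]
    have hA : (stepA acc d f).items = acc.items ++ [(d, max 0 f)] := by
      simp only [stepA, hc0, Bool.false_eq_true, if_false, hgetD]
      by_cases hlt : (0:Int) < f
      · rw [if_pos hlt, PySem.Dict.items_insert_of_contains _ _ hc1, hins0,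
          List.map_append, hmapid]
        simp [max_eq_right (le_of_lt hlt)]
      · rw [if_neg hlt, hins0]
        simp [max_eq_left (le_of_not_gt hlt)]
    have hcgf : g.contains d = false := hanyg
    have hgd : g.getD d [] = [] := by
      simp [PySem.Dict.getD, PySem.Dict.get?, hfd]
    have hG : (stepG g d f).items = g.items ++ [(d, [f])] := by
      simp only [stepG, hgd, List.nil_append]
      exact PySem.Dict.items_insert_of_not_contains _ _ hcgf
    constructor
    · rw [hA, hG, List.map_append, hi]
      simp [redMax]
    · rw [hG, List.map_append, List.nodup_append]
      refine ⟨hn, by simp, ?_⟩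
      intro a ha b hbm
      obtain ⟨q, hq, rfl⟩ := List.mem_map.1 ha
      have hbd : b = d := by simpa using hbm
      intro he
      exact hnk q hq (by simp [he, hbd])
  | some q =>
    have hq1 : q.1 = d := by have := List.find?_some hfd; simpa using this
    have hqm : q ∈ g.items := List.mem_of_find?_eq_some hfd
    have huniq : ∀ p ∈ g.items, p.1 = d → p = (d, q.2) := by
      have hdm : (d, q.2) ∈ g.items := by rw [← hq1]; exact hqm
      exact mem_eq_of_nodup g.items d q.2 hn hdm
    have hanyg : g.items.any (fun p => p.1 == d) = true := by
      simp only [List.any_eq_true]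
      exact ⟨q, hqm, by simp [hq1]⟩
    have hanya : acc.items.any (fun p => p.1 == d) = true := by
      rw [hi, any_map_redMax, hanyg]
    have hcg : g.contains d = true := hanyg
    have hca : acc.contains d = true := hanya
    have hfinda : acc.items.find? (fun p => p.1 == d) = some (d, q.2.foldl max 0) := by
      rw [hi, find?_map_redMax, hfd]
      simp [redMax, hq1]
    have hgd : g.getD d [] = q.2 := by
      simp [PySem.Dict.getD, PySem.Dict.get?, hfd]
    have hGitems : (stepG g d f).items =
        g.items.map (fun p => if p.1 == d then (d, q.2 ++ [f]) else p) := by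
      simp only [stepG, hgd]
      exact PySem.Dict.items_insert_of_contains _ _ hcg
    have hGmap : (stepG g d f).items.map redMax =
        g.items.map (fun p => if p.1 == d then (d, max (q.2.foldl max 0) f) else redMax p) := by
      rw [hGitems, List.map_map]
      apply List.map_congr_left
      intro p _
      by_cases hpd : (p.1 == d) = true
      · have : (q.2 ++ [f]).foldl max 0 = max (q.2.foldl max 0) f := by
          rw [List.foldl_append]; rfl
        simp [Function.comp, hpd, redMax, this]
      · simp [Function.comp, hpd]
    have hnod : ((stepG g d f).items.map Prod.fst) = g.items.map Prod.fst := by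
      rw [hGitems, List.map_map]
      apply List.map_congr_left
      intro p _
      by_cases hpd : (p.1 == d) = true
      · simp [Function.comp, beq_iff_eq.1 hpd]
      · simp [Function.comp, hpd]
    refine ⟨?_, by rw [hnod]; exact hn⟩
    by_cases hlt : q.2.foldl max 0 < f
    · have hA : (stepA acc d f).items =
          acc.items.map (fun p => if p.1 == d then (d, f) else p) := by
        simp only [stepA, hca, if_true, PySem.Dict.getD, PySem.Dict.get?, hfinda,
          Option.map_some, Option.getD_some, hlt, if_true]
        exact PySem.Dict.items_insert_of_contains _ _ hca
      rw [hA, hGmap, hi, List.map_map]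
      apply List.map_congr_left
      intro p _
      by_cases hpd : (p.1 == d) = true
      · simp [Function.comp, redMax, hpd, max_eq_right (le_of_lt hlt)]
      · simp [Function.comp, redMax, hpd]
    · have hA : (stepA acc d f).items = acc.items := by
        simp only [stepA, hca, if_true, PySem.Dict.getD, PySem.Dict.get?, hfinda,
          Option.map_some, Option.getD_some, hlt, if_false]
      rw [hA, hGmap, hi]
      apply List.map_congr_left
      intro p hp
      by_cases hpd : (p.1 == d) = true
      · have hpq := huniq p hp (beq_iff_eq.1 hpd)
        subst hpq
        simp [redMax, max_eq_left (le_of_not_gt hlt)]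
      · simp [hpd]

lemma DRel_fold (events : List (String × Int)) (acc : PySem.Dict String Int)
    (g : PySem.Dict String (List Int)) (h : DRel acc g) :
    DRel (events.foldl (fun a p => stepA a p.1 p.2) acc)
        (events.foldl (fun g p => stepG g p.1 p.2) g) := by
  induction events generalizing acc g with
  | nil => exact h
  | cons e t ih => exact ih _ _ (DRel_step _ _ _ _ h)

-- the two programs' per-term work, after the dict lookups are resolved under Pre_
def FA (acc : PySem.Dict String Int) (p : String × List (List (String × Int))) : PySem.Dict String Int :=
  (p.2.getD 1 []).foldl (fun a q => stepA a q.1 q.2) acc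
def FG (g : PySem.Dict String (List Int)) (p : String × List (List (String × Int))) : PySem.Dict String (List Int) :=
  (p.2.getD 1 []).foldl (fun g q => stepG g q.1 q.2) g

lemma DRel_outer (l : List (String × List (List (String × Int))))
    (acc : PySem.Dict String Int) (g : PySem.Dict String (List Int)) (h : DRel acc g) :
    DRel (l.foldl FA acc) (l.foldl FG g) := by
  induction l generalizing acc g with
  | nil => exact h
  | cons e t ih => exact ih _ _ (DRel_fold _ _ _ h)

-- ===== VERDICT (by name: the statement is the Claim_ definition above) =====
theorem get_max_freq_spec : Claim_equal_get_max_freq := by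
  intro inv _hdom hpre
  obtain ⟨hnd, hall⟩ := hpre
  show get_max_freq inv = get_max_freq_alt inv
  unfold get_max_freq get_max_freq_alt
  rw [show (PySem.Dict.mk inv).keys = inv.map Prod.fst from rfl,
      show (PySem.Dict.mk inv).values = inv.map Prod.snd from rfl,
      List.foldl_map, List.foldl_map]
  rw [PySem.List.foldl_congr_mem inv _ FA PySem.Dict.empty ?hA,
      PySem.List.foldl_congr_mem inv _ FG PySem.Dict.empty ?hG]
  case hA =>
    intro acc p hp
    have hget : (PySem.Dict.mk inv).get? p.1 = some p.2 := by
      simp only [PySem.Dict.get?, find?_nodup inv p.1 p.2 hnd hp, Option.map_some]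
    have hlen : 2 ≤ p.2.length := (hall p hp).1
    have hpy : PySem.List.pyGet? p.2 1 = some (p.2.getD 1 []) := by
      obtain ⟨a, b, t, he⟩ : ∃ a b t, p.2 = a :: b :: t := by
        match hx : p.2, hlen with
        | a :: b :: t, _ => exact ⟨a, b, t, rfl⟩
      rw [he]
      simp [pysem, PySem.List.pyGet?, PySem.List.pyIdx?]
    simp only [hget, hpy]
    rw [show (PySem.Dict.mk (p.2.getD 1 [])).keys = (p.2.getD 1 []).map Prod.fst from rfl,
        List.foldl_map]
    apply PySem.List.foldl_congr_mem
    intro a q hq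
    have hgd : (PySem.Dict.mk (p.2.getD 1 [])).getD q.1 0 = q.2 := by
      simp only [PySem.Dict.getD, PySem.Dict.get?,
        find?_nodup (p.2.getD 1 []) q.1 q.2 (hall p hp).2 hq, Option.map_some,
        Option.getD_some]
    simp only [hgd]
    rfl
  case hG =>
    intro g p hp
    have hlen : 2 ≤ p.2.length := (hall p hp).1
    have hpy : PySem.List.pyGet? p.2 1 = some (p.2.getD 1 []) := by
      obtain ⟨a, b, t, he⟩ : ∃ a b t, p.2 = a :: b :: t := by
        match hx : p.2, hlen with
        | a :: b :: t, _ => exact ⟨a, b, t, rfl⟩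
      rw [he]
      simp [pysem, PySem.List.pyGet?, PySem.List.pyIdx?]
    simp only [hpy]
    rfl
  obtain ⟨hi, -⟩ := DRel_outer inv PySem.Dict.empty PySem.Dict.empty ⟨rfl, List.nodup_nil⟩
  rw [hi]
  apply List.map_congr_left
  intro p _
  simp [redMax, pyMaxSeedZero_eq]
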